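-- pv_equiv track=rewrite | github.com/Manondodo/2026-ECE-Ing4-Fin-IA-Projet1-Gr02 | Gr02-Louis_Giraudeau_Gisclon-Sujet40/src/data_utils.py | make_bounds_by_group
-- ===== SOURCE A (Python) =====
-- from typing import Dict, List, Tuple, Optional
--
-- def make_bounds_by_group(
--     tickers: List[str],
--     group_map: Dict[str, str],
--     default_group: str = "UNKNOWN",
-- ) -> Dict[str, List[str]]:
--     """
--     Returns dict group -> list of tickers in that group.
--     """
--     groups: Dict[str, List[str]] = {}
--     for t in tickers:
--         g = group_map.get(t, default_group)
--         groups.setdefault(g, []).append(t)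
--     return groups
-- ===== SOURCE B (Python) =====
-- def make_bounds_by_group(tickers, group_map, default_group="UNKNOWN"):
--     """
--     Returns dict group -> list of tickers in that group.
--     Two-pass strategy: compute each ticker's key, dedupe keys in first-appearance
--     order, then collect each group's members by filtering the ticker list.
--     """
--     keys = [group_map.get(t, default_group) for t in tickers]
--     return {
--         g: [t for t, k in zip(tickers, keys) if k == g]
--         for g in dict.fromkeys(keys)
--     }
-- ===== Notes on version B (the rewrite author's own statement) =====
-- stated objective: alternative
-- what changed: Replaces the single hash-accumulation pass with setdefault/append by a key pre-pass, an ordered dedup of the keys, and a per-group filter comprehension.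
import Mathlib
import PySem

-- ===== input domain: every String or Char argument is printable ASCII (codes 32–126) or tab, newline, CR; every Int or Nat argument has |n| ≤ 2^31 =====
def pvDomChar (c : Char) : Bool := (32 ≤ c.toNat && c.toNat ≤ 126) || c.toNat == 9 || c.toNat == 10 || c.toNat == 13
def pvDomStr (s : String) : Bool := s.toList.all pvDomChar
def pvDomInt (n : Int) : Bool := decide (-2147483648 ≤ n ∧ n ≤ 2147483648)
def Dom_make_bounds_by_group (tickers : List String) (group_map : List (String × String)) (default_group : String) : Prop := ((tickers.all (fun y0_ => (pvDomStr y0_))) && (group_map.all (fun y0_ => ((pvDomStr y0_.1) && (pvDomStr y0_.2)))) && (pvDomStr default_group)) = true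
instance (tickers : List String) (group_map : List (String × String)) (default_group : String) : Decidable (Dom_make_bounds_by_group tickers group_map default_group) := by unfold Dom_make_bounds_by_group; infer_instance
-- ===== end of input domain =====

-- B rebuilds the grouping by key pre-pass + ordered dedup + per-group filter instead of
-- A's single setdefault/append accumulation pass (objective: alternative decomposition).


-- ===== PORT A =====
-- 'groups.setdefault(g, []).append(t)' sets groups[g] = groups.get(g, []) + [t]:
-- exactly PySem.Dict.modify g [] (· ++ [t]).
def make_bounds_by_group (tickers : List String) (group_map : List (String × String)) (default_group : String) : List (String × List String) :=
  let gm := PySem.Dict.ofList group_map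
  (tickers.foldl
    (fun groups t => groups.modify (gm.getD t default_group) [] (fun xs => xs ++ [t]))
    PySem.Dict.empty).items

-- ===== PORT B =====
-- Source B: keys pre-pass, dict.fromkeys ordered dedup (= PySem.List.dedup), per-group zip/filter.
def make_bounds_by_group_alt (tickers : List String) (group_map : List (String × String)) (default_group : String) : List (String × List String) :=
  let gm := PySem.Dict.ofList group_map
  let keys := tickers.map (fun t => gm.getD t default_group)
  (PySem.List.dedup keys).map (fun g =>
    (g, ((tickers.zip keys).filter (fun p => p.2 == g)).map (fun p => p.1)))

-- ===== PRECONDITION & SPEC =====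
def Spec_make_bounds_by_group (tickers : List String) (group_map : List (String × String)) (default_group : String) (out : List (String × List String)) : Prop := out = make_bounds_by_group_alt tickers group_map default_group
instance (tickers : List String) (group_map : List (String × String)) (default_group : String) (out : List (String × List String)) : Decidable (Spec_make_bounds_by_group tickers group_map default_group out) := by unfold Spec_make_bounds_by_group; infer_instance

-- ===== CLAIM (what is proved, stated in full; the proofs are below) =====
def Claim_equal_make_bounds_by_group : Prop := ∀ (tickers : List String) (group_map : List (String × String)) (default_group : String), Dom_make_bounds_by_group tickers group_map default_group → Spec_make_bounds_by_group tickers group_map default_group (make_bounds_by_group tickers group_map default_group)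

-- ===== LEMMAS AND PROOFS =====

-- B's zip/filter/map for a group equals the filter of A's pair view of the loop.
theorem pv_filter_swap (l : List String) (key : String → String) (g : String) :
    ((l.map (fun t => (key t, t))).filter (fun p => p.1 == g)).map (fun p => p.2)
      = ((l.zip (l.map key)).filter (fun p => p.2 == g)).map (fun p => p.1) := by
  induction l with
  | nil => rfl
  | cons t l ih =>
    simp only [List.map_cons, List.zip_cons_cons, List.filter_cons]
    by_cases h : key t == g <;> simp [h, ih]

theorem make_bounds_items (tickers : List String) (key : String → String) :
    (tickers.foldl
        (fun (groups : PySem.Dict String (List String)) t =>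
          groups.modify (key t) [] (fun xs => xs ++ [t]))
        PySem.Dict.empty).items
      = (PySem.List.dedup (tickers.map key)).map (fun g =>
          (g, ((tickers.zip (tickers.map key)).filter (fun p => p.2 == g)).map (fun p => p.1))) := by
  set F := tickers.foldl
      (fun (groups : PySem.Dict String (List String)) t =>
        groups.modify (key t) [] (fun xs => xs ++ [t]))
      PySem.Dict.empty with hF
  have hnod : F.keys.Nodup := by
    rw [hF]
    exact PySem.Dict.nodup_keys_foldl_modify_key tickers key [] _ PySem.Dict.empty
      PySem.Dict.nodup_keys_empty
  have hkeys : F.keys = PySem.List.dedup (tickers.map key) := by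
    rw [hF, PySem.Dict.keys_foldl_modify_key]
    simp [PySem.Set.update_nil_left, PySem.Dict.keys_empty]
  have hgetD : ∀ g, F.getD g [] = ((tickers.zip (tickers.map key)).filter (fun p => p.2 == g)).map (fun p => p.1) := by
    intro g
    have hmap : F = (tickers.map (fun t => (key t, t))).foldl
        (fun (groups : PySem.Dict String (List String)) p =>
          groups.modify p.1 [] (fun xs => xs ++ [p.2]))
        PySem.Dict.empty := by
      rw [hF, List.foldl_map]
    rw [hmap, PySem.Dict.getD_foldl_modify_append, PySem.Dict.getD_empty]
    simpa using pv_filter_swap tickers key g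
  rw [PySem.Dict.items_eq_map_keys F hnod [], hkeys]
  exact List.map_congr_left (fun g _ => by rw [hgetD g])

-- ===== VERDICT (by name: the statement is the Claim_ definition above) =====
theorem make_bounds_by_group_spec : Claim_equal_make_bounds_by_group := by
  intro tickers group_map default_group _
  unfold Spec_make_bounds_by_group make_bounds_by_group make_bounds_by_group_alt
  exact make_bounds_items tickers (fun t => (PySem.Dict.ofList group_map).getD t default_group)
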